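-- pv_equiv track=rewrite | github.com/manv-lang/manv | manv/abi.py | _normalize_sysv_classes
-- ===== SOURCE A (Python) =====
-- SYSV_NO_CLASS = "NO"
--
-- SYSV_INTEGER = "INTEGER"
--
-- SYSV_SSE = "SSE"
--
-- SYSV_SSEUP = "SSEUP"
--
-- def _normalize_sysv_classes(classes: list[str]) -> list[str]:
--     out = [c for c in classes if c != SYSV_NO_CLASS]
--     if not out:
--         return [SYSV_INTEGER]
--
--     for i, c in enumerate(out):
--         if c == SYSV_SSEUP:
--             if i == 0 or out[i - 1] not in {SYSV_SSE, SYSV_SSEUP}: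
--                 out[i] = SYSV_SSE
--
--     return out
-- ===== SOURCE B (Python) =====
-- SYSV_NO_CLASS = "NO"
-- SYSV_INTEGER = "INTEGER"
-- SYSV_SSE = "SSE"
-- SYSV_SSEUP = "SSEUP"
--
-- def _normalize_sysv_classes(classes: list[str]) -> list[str]:
--     res = []
--     prev = None
--     for c in classes:
--         if c == SYSV_NO_CLASS:
--             continue
--         if c == SYSV_SSEUP and prev not in (SYSV_SSE, SYSV_SSEUP):
--             c = SYSV_SSE
--         res.append(c)
--         prev = c
--     return res if res else [SYSV_INTEGER]
-- ===== Notes on version B (the rewrite author's own statement) =====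
-- stated objective: simpler
-- what changed: Replaced A's two passes (comprehension filter, then an index-based in-place fixup loop reading out[i-1]) by one streaming pass that skips NO elements and tracks the last emitted class in a prev variable, with no indexing or mutation of the output.
import Mathlib
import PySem

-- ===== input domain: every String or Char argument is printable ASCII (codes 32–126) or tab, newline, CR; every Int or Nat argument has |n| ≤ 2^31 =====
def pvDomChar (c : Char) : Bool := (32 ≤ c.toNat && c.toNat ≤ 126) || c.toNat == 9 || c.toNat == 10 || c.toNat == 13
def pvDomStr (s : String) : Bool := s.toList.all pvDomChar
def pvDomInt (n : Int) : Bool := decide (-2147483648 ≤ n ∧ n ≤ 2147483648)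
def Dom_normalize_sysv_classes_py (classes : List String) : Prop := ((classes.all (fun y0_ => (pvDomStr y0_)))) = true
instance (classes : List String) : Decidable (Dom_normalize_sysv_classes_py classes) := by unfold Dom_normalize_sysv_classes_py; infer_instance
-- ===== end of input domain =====

-- B replaces A's two passes (filter, then index-based in-place fixup) by one streaming
-- pass tracking the previously emitted class; objective: simpler (same O(n) cost).

-- ===== PORT A =====
-- one step of A's `for i, c in enumerate(out)` fixup loop (mutates `out` via set)
def pvStepA (acc : List String) (i : Nat) : List String :=
  if acc.getD i "" = "SSEUP" ∧ (i = 0 ∨ ¬ (acc.getD (i - 1) "" = "SSE" ∨ acc.getD (i - 1) "" = "SSEUP"))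
  then acc.set i "SSE" else acc

def normalize_sysv_classes_py (classes : List String) : List String :=
  let out := classes.filter (fun c => c != "NO")
  if out = [] then ["INTEGER"]
  else (List.range out.length).foldl pvStepA out

-- ===== PORT B =====
-- B's single loop: skip "NO", rewrite a leading "SSEUP" using the last emitted class
def pvLoopB (prev : Option String) : List String → List String
  | [] => []
  | c :: rest =>
    if c = "NO" then pvLoopB prev rest
    else
      let c' := if c = "SSEUP" ∧ ¬ (prev = some "SSE" ∨ prev = some "SSEUP") then "SSE" else c
      c' :: pvLoopB (some c') rest

def normalize_sysv_classes_py_alt (classes : List String) : List String :=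
  let res := pvLoopB none classes
  if res = [] then ["INTEGER"] else res

-- ===== PRECONDITION & SPEC =====
def Spec_normalize_sysv_classes_py (classes : List String) (out : List String) : Prop := out = normalize_sysv_classes_py_alt classes
instance (classes : List String) (out : List String) : Decidable (Spec_normalize_sysv_classes_py classes out) := by unfold Spec_normalize_sysv_classes_py; infer_instance

-- ===== CLAIM (what is proved, stated in full; the proofs are below) =====
def Claim_equal_normalize_sysv_classes_py : Prop := ∀ (classes : List String), Dom_normalize_sysv_classes_py classes → Spec_normalize_sysv_classes_py classes (normalize_sysv_classes_py classes)

-- ===== LEMMAS AND PROOFS =====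

-- is the class in {SSE, SSEUP}?
def pvInSet (c : String) : Bool := c == "SSE" || c == "SSEUP"
def pvInSetO : Option String → Bool
  | none => false
  | some c => pvInSet c

-- reference recursion on the filtered list, carrying whether the previous ORIGINAL
-- element is in {SSE,SSEUP} (the same as for the emitted one)
def pvSpec (b : Bool) : List String → List String
  | [] => []
  | c :: rest =>
    (if c = "SSEUP" ∧ b = false then "SSE" else c) :: pvSpec (pvInSet c) rest

-- pointwise description: the value A/B produce at index i of the filtered list
def pvTr (b : Bool) (out : List String) (i : Nat) : String :=
  if out.getD i "" = "SSEUP" ∧ (if i = 0 then b else pvInSet (out.getD (i - 1) "")) = false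
  then "SSE" else out.getD i ""

theorem pvInSetO_iff (p : Option String) :
    pvInSetO p = false ↔ ¬ (p = some "SSE" ∨ p = some "SSEUP") := by
  cases p with
  | none => simp [pvInSetO]
  | some c => simp [pvInSetO, pvInSet]

theorem pvLoopB_eq_spec (l : List String) (p : Option String) :
    pvLoopB p l = pvSpec (pvInSetO p) (l.filter (fun c => c != "NO")) := by
  induction l generalizing p with
  | nil => simp [pvLoopB, pvSpec]
  | cons c rest ih =>
    by_cases h : c = "NO"
    · simp [pvLoopB, h, ih]
    · have hf : (c != "NO") = true := by simp [h]
      simp only [pvLoopB, h, if_false, List.filter_cons, hf, if_true, pvSpec]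
      rw [List.cons.injEq]
      by_cases hc : c = "SSEUP" ∧ ¬ (p = some "SSE" ∨ p = some "SSEUP")
      · have hb : pvInSetO p = false := (pvInSetO_iff p).2 hc.2
        refine ⟨by rw [if_pos hc, if_pos ⟨hc.1, hb⟩], ?_⟩
        rw [if_pos hc, ih]
        have : pvInSetO (some "SSE") = pvInSet c := by
          simp [pvInSetO, pvInSet, hc.1]
        rw [this]
      · have hc' : ¬ (c = "SSEUP" ∧ pvInSetO p = false) := by
          intro hx; exact hc ⟨hx.1, (pvInSetO_iff p).1 hx.2⟩
        refine ⟨by rw [if_neg hc, if_neg hc'], ?_⟩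
        rw [if_neg hc, ih]
        rfl

theorem pvSpec_eq_map (out : List String) (b : Bool) :
    pvSpec b out = (List.range out.length).map (pvTr b out) := by
  induction out generalizing b with
  | nil => simp [pvSpec]
  | cons c rest ih =>
    simp only [pvSpec, List.length_cons, List.range_succ_eq_map, List.map_cons, List.map_map]
    rw [List.cons.injEq]
    refine ⟨by simp [pvTr], ?_⟩
    rw [ih (pvInSet c)]
    apply List.map_congr_left
    intro i _
    cases i with
    | zero => simp [pvTr]
    | succ j => simp [pvTr]

theorem pvSpec_nil_iff (b : Bool) (l : List String) : pvSpec b l = [] ↔ l = [] := by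
  cases l <;> simp [pvSpec]

theorem pvInSet_pvTr (b : Bool) (out : List String) (i : Nat) :
    pvInSet (pvTr b out i) = pvInSet (out.getD i "") := by
  unfold pvTr
  by_cases h : out.getD i "" = "SSEUP" ∧ (if i = 0 then b else pvInSet (out.getD (i - 1) "")) = false
  · rw [if_pos h, h.1]; simp [pvInSet]
  · rw [if_neg h]

theorem pvFoldA_length (ns : List Nat) (l : List String) :
    (ns.foldl pvStepA l).length = l.length := by
  induction ns generalizing l with
  | nil => rfl
  | cons n ns ih =>
    rw [List.foldl_cons, ih]
    unfold pvStepA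
    split_ifs <;> simp

theorem pvGetD_set (l : List String) (i j : Nat) (a : String) :
    (l.set i a).getD j "" = if i = j ∧ i < l.length then a else l.getD j "" := by
  simp only [List.getD_eq_getElem?_getD, List.getElem?_set]
  by_cases h1 : i = j
  · subst h1
    by_cases h2 : i < l.length
    · simp [h2]
    · have : l[i]? = none := List.getElem?_eq_none (by omega)
      simp [h2]
  · simp [h1]

theorem pvFoldA_getD (out : List String) (k : Nat) (j : Nat) :
    ((List.range k).foldl pvStepA out).getD j "" =
      if j < k then pvTr false out j else out.getD j "" := by
  induction k generalizing j with
  | zero => simp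
  | succ k ih =>
    rw [List.range_succ, List.foldl_append, List.foldl_cons, List.foldl_nil]
    set r := (List.range k).foldl pvStepA out with hr
    have hc : r.getD k "" = out.getD k "" := by rw [ih]; simp
    have hlen : r.length = out.length := pvFoldA_length _ _
    have hcond :
        (out.getD k "" = "SSEUP" ∧ (k = 0 ∨ ¬ (r.getD (k - 1) "" = "SSE" ∨ r.getD (k - 1) "" = "SSEUP")))
        ↔ (out.getD k "" = "SSEUP" ∧ (if k = 0 then false else pvInSet (out.getD (k - 1) "")) = false) := by
      constructor
      · rintro ⟨h1, h2⟩
        refine ⟨h1, ?_⟩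
        cases h2 with
        | inl h0 => simp [h0]
        | inr hns =>
          by_cases h0 : k = 0
          · simp [h0]
          · simp only [h0, if_false]
            have hki := ih (k - 1)
            rw [if_pos (by omega : k - 1 < k)] at hki
            rw [hki] at hns
            have hset := pvInSet_pvTr false out (k - 1)
            by_contra hne
            have ht : pvInSet (pvTr false out (k - 1)) = true := by
              rw [hset]; revert hne; cases pvInSet (out.getD (k - 1) "") <;> simp
            simp only [pvInSet, Bool.or_eq_true, beq_iff_eq] at ht
            exact hns ht
      · rintro ⟨h1, h2⟩
        refine ⟨h1, ?_⟩
        by_cases h0 : k = 0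
        · exact Or.inl h0
        · right
          simp only [h0, if_false] at h2
          have hki := ih (k - 1)
          rw [if_pos (by omega : k - 1 < k)] at hki
          rw [hki]
          intro hor
          have ht : pvInSet (pvTr false out (k - 1)) = true := by
            simp only [pvInSet, Bool.or_eq_true, beq_iff_eq]; exact hor
          rw [pvInSet_pvTr] at ht
          rw [ht] at h2
          exact absurd h2 (by simp)
    by_cases hA : r.getD k "" = "SSEUP" ∧ (k = 0 ∨ ¬ (r.getD (k - 1) "" = "SSE" ∨ r.getD (k - 1) "" = "SSEUP"))
    · -- A sets index k to "SSE"
      have hstep : pvStepA r k = r.set k "SSE" := by unfold pvStepA; rw [if_pos hA]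
      rw [hc] at hA
      have hT := hcond.1 hA
      have hklen : k < out.length := by
        by_contra hko
        have : out.getD k "" = "" := by
          simp [List.getD_eq_getElem?_getD, List.getElem?_eq_none (by omega : out.length ≤ k)]
        rw [this] at hT
        exact absurd hT.1 (by simp)
      rw [hstep, pvGetD_set]
      by_cases hj : j = k
      · subst hj
        rw [if_pos ⟨rfl, by omega⟩, if_pos (Nat.lt_succ_self j)]
        unfold pvTr
        rw [if_pos hT]
      · rw [if_neg (by intro hx; exact hj hx.1.symm), ih]
        by_cases hjk : j < k
        · rw [if_pos hjk, if_pos (by omega)]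
        · rw [if_neg hjk, if_neg (by omega)]
    · -- A leaves the list unchanged
      have hstep : pvStepA r k = r := by unfold pvStepA; rw [if_neg hA]
      rw [hc] at hA
      have hT : ¬ (out.getD k "" = "SSEUP" ∧ (if k = 0 then false else pvInSet (out.getD (k - 1) "")) = false) :=
        fun hx => hA (hcond.2 hx)
      rw [hstep, ih]
      by_cases hjk : j < k
      · rw [if_pos hjk, if_pos (by omega)]
      · rw [if_neg hjk]
        by_cases hj : j = k
        · subst hj
          rw [if_pos (Nat.lt_succ_self j)]
          unfold pvTr
          rw [if_neg hT]
        · rw [if_neg (by omega)]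

theorem pvFoldA_eq_map (out : List String) :
    (List.range out.length).foldl pvStepA out = (List.range out.length).map (pvTr false out) := by
  apply List.ext_getElem
  · rw [pvFoldA_length]; simp
  · intro i h1 h2
    have hi : i < out.length := by rw [pvFoldA_length] at h1; exact h1
    have hg := pvFoldA_getD out out.length i
    rw [if_pos hi] at hg
    rw [← List.getD_eq_getElem _ "" h1, hg]
    simp

-- ===== VERDICT (by name: the statement is the Claim_ definition above) =====
theorem normalize_sysv_classes_py_spec : Claim_equal_normalize_sysv_classes_py := by
  intro classes _
  unfold Spec_normalize_sysv_classes_py normalize_sysv_classes_py normalize_sysv_classes_py_alt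
  have hB : pvLoopB none classes = pvSpec false (classes.filter (fun c => c != "NO")) :=
    pvLoopB_eq_spec classes none
  set out := classes.filter (fun c => c != "NO") with hout
  rw [hB]
  by_cases h : out = []
  · rw [if_pos h, if_pos ((pvSpec_nil_iff false out).2 h)]
  · rw [if_neg h, if_neg (fun hx => h ((pvSpec_nil_iff false out).1 hx))]
    rw [pvFoldA_eq_map, pvSpec_eq_map]
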